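-- pv_equiv track=rewrite | github.com/Kavuti/advent-of-code-2020 | day16/day16.py | follows_rules
-- ===== SOURCE A (Python) =====
-- def follows_rules(ticket, rules):
--     used_rules = []
--     for n in ticket:
--         found = False
--         for name, vals in rules.items():
--             if not name in used_rules and n in vals:
--                 found = True
--                 break
--         if not found:
--             return n
--     return 0
-- ===== SOURCE B (Python) =====
-- def follows_rules(ticket, rules):
--     valid = set()
--     for vals in rules.values():
--         valid.update(vals)
--     for n in ticket:
--         if n not in valid:
--             return n
--     return 0
-- ===== Notes on version B (the rewrite author's own statement) =====
-- stated objective: simpler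
-- what changed: Builds one set of all rule values up front, then a single membership pass over the ticket, instead of rescanning every rule's value list for each ticket value (A's unused used_rules bookkeeping is dropped).
import Mathlib
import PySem

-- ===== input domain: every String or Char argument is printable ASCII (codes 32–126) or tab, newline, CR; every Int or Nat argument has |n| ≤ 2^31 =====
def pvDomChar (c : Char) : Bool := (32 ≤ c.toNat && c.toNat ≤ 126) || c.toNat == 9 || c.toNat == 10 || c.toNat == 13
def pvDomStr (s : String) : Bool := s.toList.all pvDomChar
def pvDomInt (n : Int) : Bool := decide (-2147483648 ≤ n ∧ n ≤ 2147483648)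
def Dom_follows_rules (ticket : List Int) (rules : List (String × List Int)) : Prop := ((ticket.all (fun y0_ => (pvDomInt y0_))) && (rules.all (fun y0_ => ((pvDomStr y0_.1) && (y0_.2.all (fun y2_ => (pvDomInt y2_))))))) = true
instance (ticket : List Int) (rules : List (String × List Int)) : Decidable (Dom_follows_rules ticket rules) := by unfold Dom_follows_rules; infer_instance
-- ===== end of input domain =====

-- B replaces A's per-value rescan of all rules with a one-time union set of all rule values
-- plus a single membership pass over the ticket (objective: simpler).


-- ===== PORT A =====
-- outer loop over the ticket, carrying A's (never-extended) used_rules list;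
-- the inner 'for name, vals in rules.items(): … break' is the first-hit scan List.any
def followsRulesLoop (ticket : List Int) (rules : List (String × List Int)) (used_rules : List String) : Int :=
  match ticket with
  | [] => 0
  | n :: rest =>
    let found := rules.any (fun p => (!(used_rules.contains p.1)) && p.2.contains n)
    if found then followsRulesLoop rest rules used_rules else n

def follows_rules (ticket : List Int) (rules : List (String × List Int)) : Int :=
  followsRulesLoop ticket rules []

-- ===== PORT B =====
def follows_rules_alt (ticket : List Int) (rules : List (String × List Int)) : Int :=
  let valid : PySem.Set Int := rules.foldl (fun s p => PySem.Set.update s p.2) PySem.Set.empty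
  match ticket.find? (fun n => !(PySem.Set.contains valid n)) with
  | some n => n
  | none => 0

-- ===== PRECONDITION & SPEC =====
def Spec_follows_rules (ticket : List Int) (rules : List (String × List Int)) (out : Int) : Prop := out = follows_rules_alt ticket rules
instance (ticket : List Int) (rules : List (String × List Int)) (out : Int) : Decidable (Spec_follows_rules ticket rules out) := by unfold Spec_follows_rules; infer_instance

-- ===== CLAIM (what is proved, stated in full; the proofs are below) =====
def Claim_equal_follows_rules : Prop := ∀ (ticket : List Int) (rules : List (String × List Int)), Dom_follows_rules ticket rules → Spec_follows_rules ticket rules (follows_rules ticket rules)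

-- ===== LEMMAS AND PROOFS =====

-- membership in the folded-up union set = some rule's value list contains n
theorem mem_foldl_update (rules : List (String × List Int)) (s : PySem.Set Int) (n : Int) :
    (n ∈ rules.foldl (fun s p => PySem.Set.update s p.2) s) ↔ n ∈ s ∨ ∃ p ∈ rules, n ∈ p.2 := by
  induction rules generalizing s with
  | nil => simp
  | cons p rest ih =>
    simp [List.foldl_cons, ih, PySem.Set.mem_update]
    tauto

theorem inner_scan_eq (rules : List (String × List Int)) (n : Int) :
    rules.any (fun p => (!(([] : List String).contains p.1)) && p.2.contains n)
      = PySem.Set.contains (rules.foldl (fun s p => PySem.Set.update s p.2) PySem.Set.empty) n := by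
  rw [Bool.eq_iff_iff, List.any_eq_true, PySem.Set.contains_iff, mem_foldl_update]
  simp [PySem.Set.empty]

theorem loop_eq (ticket : List Int) (rules : List (String × List Int)) :
    followsRulesLoop ticket rules [] = follows_rules_alt ticket rules := by
  induction ticket with
  | nil => simp [followsRulesLoop, follows_rules_alt]
  | cons n rest ih =>
    simp only [followsRulesLoop, follows_rules_alt, List.find?_cons] at ih ⊢
    rw [inner_scan_eq rules n]
    by_cases hm : n ∈ List.foldl (fun s p => PySem.Set.update s p.2) PySem.Set.empty rules
    all_goals simp only [PySem.Set.empty] at hm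
    · simpa [hm] using ih
    · simp [hm]

-- ===== VERDICT (by name: the statement is the Claim_ definition above) =====
theorem follows_rules_spec : Claim_equal_follows_rules := by
  intro ticket rules _
  unfold Spec_follows_rules follows_rules
  exact loop_eq ticket rules
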